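-- pv_equiv track=rewrite | github.com/wieliczk/connect4game | main.py | checkdagRD
-- ===== SOURCE A (Python) =====
-- MAXROW = 7
--
-- def checkdagRD(aList, tile, row, level, count):
-- 	try:
-- 		if aList[row+1][level-1] == tile:
-- 			count +=1
-- 			row +=1
-- 			level -=1
-- 			if level <= 0:
-- 				raise Exception
-- 			elif row >= MAXROW:
-- 				raise Exception
-- 			elif count == 4:
-- 				raise Exception
-- 			else:
-- 				count = checkdagRD(aList, tile, row, level, count)
-- 		else:
-- 			return count
-- 	except:
-- 		return count
-- 	return count
-- ===== SOURCE B (Python) =====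
-- MAXROW = 7
--
-- def checkdagRD(aList, tile, row, level, count):
--     try:
--         while aList[row+1][level-1] == tile:
--             count += 1
--             row += 1
--             level -= 1
--             if level <= 0 or row >= MAXROW or count == 4:
--                 return count
--         return count
--     except:
--         return count
-- ===== Notes on version B (the rewrite author's own statement) =====
-- stated objective: idiomatic
-- what changed: The tail recursion carrying (row, level, count) on the call stack is rewritten as a single while loop mutating those variables in place, with the three stop guards merged into one combined condition.
import Mathlib
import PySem

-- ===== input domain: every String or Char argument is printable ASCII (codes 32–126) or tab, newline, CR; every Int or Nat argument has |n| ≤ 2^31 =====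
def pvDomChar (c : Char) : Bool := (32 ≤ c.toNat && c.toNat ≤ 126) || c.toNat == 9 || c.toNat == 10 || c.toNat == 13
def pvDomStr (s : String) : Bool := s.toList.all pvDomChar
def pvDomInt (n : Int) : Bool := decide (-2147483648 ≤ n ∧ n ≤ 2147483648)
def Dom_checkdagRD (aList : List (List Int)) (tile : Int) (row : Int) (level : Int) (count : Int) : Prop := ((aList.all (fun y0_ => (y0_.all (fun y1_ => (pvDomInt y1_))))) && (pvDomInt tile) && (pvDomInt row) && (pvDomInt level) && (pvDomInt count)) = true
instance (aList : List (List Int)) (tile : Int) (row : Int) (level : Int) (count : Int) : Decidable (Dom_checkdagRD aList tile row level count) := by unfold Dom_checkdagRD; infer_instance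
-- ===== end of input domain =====

-- B rewrites A's tail recursion as a single while loop over (row, level, count); same diagonal
-- walk, guards and negative-index wrap, state kept in a loop instead of on the call stack.
-- ===== PORT A =====
-- literal port of A's recursion: index aList[row+1][level-1] (Python negative-index wrap,
-- none = IndexError, caught by the bare except -> return count), then the guard chain.
def checkdagRD (aList : List (List Int)) (tile : Int) (row : Int) (level : Int) (count : Int) : Int :=
  match (PySem.List.pyGet? aList (row + 1)).bind (fun r => PySem.List.pyGet? r (level - 1)) with
  | none => count
  | some v =>
    if v = tile then
      let count := count + 1
      let row := row + 1
      let level := level - 1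
      if level ≤ 0 then count
      else if row ≥ 7 then count
      else if count = 4 then count
      else checkdagRD aList tile row level count
    else count
termination_by level.toNat
decreasing_by simp_wf; omega

-- ===== PORT B =====
-- the while loop of Source B: state (row, level, count), exit on mismatch, IndexError, or the
-- combined guard after mutating the state.
def checkdagRD_loop (aList : List (List Int)) (tile : Int) (row : Int) (level : Int) (count : Int) : Int :=
  match PySem.List.pyGet? aList (row + 1) with
  | none => count
  | some rowL =>
    match PySem.List.pyGet? rowL (level - 1) with
    | none => count
    | some v =>
      if v = tile then
        if level - 1 ≤ 0 ∨ row + 1 ≥ 7 ∨ count + 1 = 4 then count + 1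
        else checkdagRD_loop aList tile (row + 1) (level - 1) (count + 1)
      else count
termination_by level.toNat
decreasing_by simp_wf; omega

def checkdagRD_alt (aList : List (List Int)) (tile : Int) (row : Int) (level : Int) (count : Int) : Int :=
  checkdagRD_loop aList tile row level count

-- ===== PRECONDITION & SPEC =====
def Spec_checkdagRD (aList : List (List Int)) (tile : Int) (row : Int) (level : Int) (count : Int) (out : Int) : Prop := out = checkdagRD_alt aList tile row level count
instance (aList : List (List Int)) (tile : Int) (row : Int) (level : Int) (count : Int) (out : Int) : Decidable (Spec_checkdagRD aList tile row level count out) := by unfold Spec_checkdagRD; infer_instance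

-- ===== CLAIM (what is proved, stated in full; the proofs are below) =====
def Claim_equal_checkdagRD : Prop := ∀ (aList : List (List Int)) (tile : Int) (row : Int) (level : Int) (count : Int), Dom_checkdagRD aList tile row level count → Spec_checkdagRD aList tile row level count (checkdagRD aList tile row level count)

-- ===== LEMMAS AND PROOFS =====

-- ===== VERDICT (by name: the statement is the Claim_ definition above) =====
theorem checkdagRD_loop_eq (aList : List (List Int)) (tile : Int) (row : Int) (level : Int) (count : Int) :
    checkdagRD_loop aList tile row level count =
      match (PySem.List.pyGet? aList (row + 1)).bind (fun r => PySem.List.pyGet? r (level - 1)) with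
      | none => count
      | some v =>
        if v = tile then
          if level - 1 ≤ 0 ∨ row + 1 ≥ 7 ∨ count + 1 = 4 then count + 1
          else checkdagRD_loop aList tile (row + 1) (level - 1) (count + 1)
        else count := by
  rw [checkdagRD_loop]
  cases hr : PySem.List.pyGet? aList (row + 1) with
  | none => rfl
  | some r => cases hv : PySem.List.pyGet? r (level - 1) <;> rfl

theorem checkdagRD_ab (aList : List (List Int)) (tile : Int) (row : Int) (level : Int) (count : Int) :
    checkdagRD aList tile row level count = checkdagRD_loop aList tile row level count := by
  fun_induction checkdagRD aList tile row level count
  all_goals rw [checkdagRD_loop_eq]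
  all_goals split <;> simp_all
  all_goals split_ifs <;> first | rfl | omega

theorem checkdagRD_spec : Claim_equal_checkdagRD := by
  intro aList tile row level count _
  unfold Spec_checkdagRD checkdagRD_alt
  exact checkdagRD_ab aList tile row level count
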